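-- pv_equiv track=rewrite | github.com/ericskim/redax | vpax/utils.py | increment_bv
-- ===== SOURCE A (Python) =====
-- def int2bv(index: int, nbits: int):
--     """
--     A really high nbits just right pads the bitvector with "False"
--     """
--
--     return tuple(True if ((index >> i) % 2 == 1) else False for i in range(nbits - 1, -1, -1))
--
-- def increment_bv(bv, increment: int, graycode=False, saturate=False):
--     """
--     Increment a bitvector's value +1 or -1.
--     """
--     assert increment == 1 or increment == -1
--     nbits = len(bv)
--     if graycode:
--         index = graytobin(bv2int(bv))
--         index = (index+increment) % 2**nbits
--         return int2bv( bintogray(index), nbits)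
--     else:
--         if bv == tuple(True for i in range(nbits)) and increment > 0:
--             if saturate:
--                 return bv
--             raise ValueError("Bitvector overflow for nonperiodic domain.")
--         if bv == tuple(False for i in range(nbits)) and increment < 0:
--             if saturate:
--                 return bv
--             raise ValueError("Bitvector overflow for nonperiodic domain.")
--         return int2bv(bv2int(bv) + increment, nbits)
--
-- def bv2int(bv):
--     """
--     Converts bitvector (list or tuple) with the standard binary encoding into an integer.
--     """
--     nbits = len(bv)
--     index = 0
--     for i in range(nbits):
--         if bv[i]:
--             index += 2**(nbits - i - 1)
--     return index
--
-- def bintogray(x: int):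
--     """
--     Convert a binary encoded positive integer into gray code.
--     """
--     assert x >= 0
--     return x ^ (x >> 1)
--
-- def graytobin(x: int):
--     """
--     Convert a gray code encoded positive integer into the standard binary encoding.
--     """
--     assert x >= 0
--     mask = x >> 1
--     while(mask != 0):
--         x = x ^ mask
--         mask = mask >> 1
--     return x
-- ===== SOURCE B (Python) =====
-- def _ripple(bits, increment):
--     """Ripple-carry +/-1 from the LSB (rightmost bit), in place.
--     Returns (bits, carry_out): carry_out True iff the carry/borrow
--     propagated past the most significant bit."""
--     flip = (increment == 1)
--     for i in range(len(bits) - 1, -1, -1):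
--         if bits[i] == flip:
--             bits[i] = not flip
--         else:
--             bits[i] = flip
--             return bits, False
--     return bits, True
--
-- def increment_bv(bv, increment: int, graycode=False, saturate=False):
--     """
--     Increment a bitvector's value +1 or -1.
--     """
--     assert increment == 1 or increment == -1
--     if graycode:
--         # gray -> binary: prefix xor; modular ripple (carry dropped); binary -> gray
--         acc = False
--         binb = []
--         for g in bv:
--             acc = acc != g
--             binb.append(acc)
--         binb, _ = _ripple(binb, increment)
--         out = []
--         prev = False
--         for b in binb:
--             out.append(b != prev)
--             prev = b
--         return tuple(out)
--     bits, carry = _ripple(list(bv), increment)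
--     if carry:
--         if saturate:
--             return bv
--         raise ValueError("Bitvector overflow for nonperiodic domain.")
--     return tuple(bits)
-- ===== Notes on version B (the rewrite author's own statement) =====
-- stated objective: alternative
-- what changed: Replaces A's big-integer round-trip (bv2int, +/-1 with pow-per-bit weights, int2bv, and the numeric gray-code xor/shift loops) by direct bit-list passes: a ripple-carry/borrow pass for the +/-1 and prefix-xor passes for the gray conversions, never converting the bitvector to an integer.
import Mathlib
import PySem

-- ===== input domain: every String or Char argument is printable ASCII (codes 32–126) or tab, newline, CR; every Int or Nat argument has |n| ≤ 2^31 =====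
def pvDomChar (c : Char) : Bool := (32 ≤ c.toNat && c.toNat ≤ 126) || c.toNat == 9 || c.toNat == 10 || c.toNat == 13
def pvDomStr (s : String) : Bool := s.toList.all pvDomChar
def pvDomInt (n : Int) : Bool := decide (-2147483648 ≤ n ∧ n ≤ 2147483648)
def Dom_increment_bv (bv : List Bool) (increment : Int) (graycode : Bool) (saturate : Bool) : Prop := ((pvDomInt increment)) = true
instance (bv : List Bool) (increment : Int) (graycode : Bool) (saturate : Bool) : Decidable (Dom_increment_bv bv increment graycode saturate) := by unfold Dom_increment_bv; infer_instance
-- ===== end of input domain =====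

-- B replaces A's int round-trip (bv2int / +-1 / int2bv, and the numeric gray-code loops) by direct
-- bit-list operations: a ripple-carry pass for +-1 and prefix-xor passes for the gray conversions
-- (objective: alternative — one algorithm on bits instead of big-integer arithmetic).

-- ===== PORT A =====
-- A's graytobin/bintogray assert x >= 0, and both call sites pass nonnegative ints,
-- so they are ported on Nat (exact there; '>> 1' on Nat is '/ 2').
def pyBintogray (x : Nat) : Nat := x ^^^ (x >>> 1)

def pyGraytobinLoop (x mask : Nat) : Nat :=
  if mask = 0 then x else pyGraytobinLoop (x ^^^ mask) (mask / 2)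
termination_by mask
decreasing_by exact Nat.div_lt_self (Nat.pos_of_ne_zero (by assumption)) (by omega)

def pyGraytobin (x : Nat) : Nat := pyGraytobinLoop x (x >>> 1)

def pyInt2bv (index : Int) (nbits : Int) : List Bool :=
  (PySem.List.pyRange (nbits - 1) (-1) (-1)).map
    (fun i => decide (PySem.Int.mod (index >>> i.toNat) 2 = 1))

def pyBv2int (bv : List Bool) : Int :=
  (PySem.List.pyRange 0 (bv.length : Int) 1).foldl
    (fun index i => if PySem.List.pyGetD bv i false then
        index + 2 ^ ((bv.length : Int) - i - 1).toNat else index) 0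

def increment_bv (bv : List Bool) (increment : Int) (graycode : Bool) (saturate : Bool) : List Bool :=
  if increment = 1 ∨ increment = -1 then
    let nbits : Int := bv.length
    if graycode then
      let index := pyGraytobin (pyBv2int bv).toNat
      pyInt2bv (pyBintogray ((PySem.Int.mod ((index : Int) + increment) (2 ^ nbits.toNat)).toNat)) nbits
    else
      if bv = List.replicate bv.length true ∧ increment > 0 then
        (if saturate then bv else [])           -- raise ValueError: outside Pre_
      else if bv = List.replicate bv.length false ∧ increment < 0 then
        (if saturate then bv else [])           -- raise ValueError: outside Pre_
      else pyInt2bv (pyBv2int bv + increment) nbits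
  else []                                       -- assert fails (AssertionError): outside Pre_

-- ===== PORT B =====
def altRipple (flip : Bool) : List Bool → List Bool × Bool
  | [] => ([], true)
  | b :: rest =>
    match altRipple flip rest with
    | (rest', true) => if b = flip then ((!flip) :: rest', true) else (flip :: rest', false)
    | (rest', false) => (b :: rest', false)

def altGrayToBin (acc : Bool) : List Bool → List Bool
  | [] => []
  | g :: t => (acc.xor g) :: altGrayToBin (acc.xor g) t

def altBinToGray (prev : Bool) : List Bool → List Bool
  | [] => []
  | b :: t => (b.xor prev) :: altBinToGray b t

def increment_bv_alt (bv : List Bool) (increment : Int) (graycode : Bool) (saturate : Bool) : List Bool :=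
  if increment = 1 ∨ increment = -1 then
    if graycode then
      altBinToGray false (altRipple (increment == 1) (altGrayToBin false bv)).1
    else
      let res := altRipple (increment == 1) bv
      if res.2 then (if saturate then bv else []) -- raise ValueError: outside Pre_
      else res.1
  else []                                        -- assert fails: outside Pre_

-- ===== PRECONDITION & SPEC =====
-- Pre_ excludes exactly the inputs where A raises: increment outside {1,-1} (AssertionError),
-- and the non-graycode all-ones/+1 or all-zeros/-1 overflow without saturate (ValueError).
def Pre_increment_bv (bv : List Bool) (increment : Int) (graycode : Bool) (saturate : Bool) : Prop :=
  (increment = 1 ∨ increment = -1) ∧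
  (graycode = true ∨ saturate = true ∨
    ¬ ((increment = 1 ∧ bv = List.replicate bv.length true) ∨
       (increment = -1 ∧ bv = List.replicate bv.length false)))
instance (bv : List Bool) (increment : Int) (graycode : Bool) (saturate : Bool) : Decidable (Pre_increment_bv bv increment graycode saturate) := by unfold Pre_increment_bv; infer_instance

def pvWitness_increment_bv : List Bool × Int × Bool × Bool := ([true, false, true], 1, false, false)

def Spec_increment_bv (bv : List Bool) (increment : Int) (graycode : Bool) (saturate : Bool) (out : List Bool) : Prop := out = increment_bv_alt bv increment graycode saturate
instance (bv : List Bool) (increment : Int) (graycode : Bool) (saturate : Bool) (out : List Bool) : Decidable (Spec_increment_bv bv increment graycode saturate out) := by unfold Spec_increment_bv; infer_instance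

-- ===== CLAIM (what is proved, stated in full; the proofs are below) =====
def Claim_equal_increment_bv : Prop := ∀ (bv : List Bool) (increment : Int) (graycode : Bool) (saturate : Bool), Dom_increment_bv bv increment graycode saturate → Pre_increment_bv bv increment graycode saturate → Spec_increment_bv bv increment graycode saturate (increment_bv bv increment graycode saturate)

-- ===== LEMMAS AND PROOFS =====

/-- Value of an LSB-first bit list. -/
def valL : List Bool → Nat
  | [] => 0
  | b :: t => b.toNat + 2 * valL t

/-- Value of an MSB-first bit list (the convention of the Python code). -/
def valM (bv : List Bool) : Nat := valL bv.reverse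

/-- LSB-first binary digits of `k`, `n` of them. -/
def lsbBits : Nat → Nat → List Bool
  | 0, _ => []
  | n + 1, k => decide (k % 2 = 1) :: lsbBits n (k / 2)

/-- Suffix-xor function: `S x = x ^^^ x/2 ^^^ x/4 ^^^ …` (the value graytobin computes). -/
def sXor (x : Nat) : Nat :=
  if x = 0 then 0 else x ^^^ sXor (x / 2)
termination_by x
decreasing_by exact Nat.div_lt_self (Nat.pos_of_ne_zero (by assumption)) (by omega)

theorem valL_lt (r : List Bool) : valL r < 2 ^ r.length := by
  induction r with
  | nil => simp [valL]
  | cons b t ih => cases b <;> simp [valL, List.length_cons, pow_succ] <;> omega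

theorem valL_append_singleton (r : List Bool) (b : Bool) :
    valL (r ++ [b]) = valL r + b.toNat * 2 ^ r.length := by
  induction r with
  | nil => cases b <;> simp [valL]
  | cons c t ih => simp [valL, ih, List.length_cons, pow_succ]; ring

theorem valM_cons (b : Bool) (t : List Bool) :
    valM (b :: t) = b.toNat * 2 ^ t.length + valM t := by
  simp [valM, List.reverse_cons, valL_append_singleton]; omega

theorem valM_lt (bv : List Bool) : valM bv < 2 ^ bv.length := by
  simpa [valM] using valL_lt bv.reverse

theorem length_lsbBits (n k : Nat) : (lsbBits n k).length = n := by
  induction n generalizing k with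
  | zero => rfl
  | succ n ih => simp [lsbBits, ih]

theorem lsbBits_valL (r : List Bool) : lsbBits r.length (valL r) = r := by
  induction r with
  | nil => rfl
  | cons b t ih =>
      have h2 : (b.toNat + 2 * valL t) / 2 = valL t := by cases b <;> simp <;> omega
      have h1 : (decide ((b.toNat + 2 * valL t) % 2 = 1)) = b := by
        cases b <;> simp [Nat.add_mul_mod_self_left]
      show lsbBits (t.length + 1) (b.toNat + 2 * valL t) = b :: t
      rw [lsbBits, h1, h2, ih]

theorem rev_lsbBits_valM (bv : List Bool) : (lsbBits bv.length (valM bv)).reverse = bv := by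
  have := lsbBits_valL bv.reverse
  simp [valM] at *
  rw [this]
  simp

theorem lsbBits_getElem (n k i : Nat) (h : i < n) :
    (lsbBits n k)[i]'(by simp [length_lsbBits, h]) = decide (k / 2 ^ i % 2 = 1) := by
  induction n generalizing k i with
  | zero => omega
  | succ n ih =>
      cases i with
      | zero => simp [lsbBits]
      | succ i =>
          have := ih (k / 2) i (by omega)
          simp [lsbBits, this, Nat.div_div_eq_div_mul, pow_succ]
          ring_nf

theorem pyInt2bv_eq (k n : Nat) : pyInt2bv (k : Int) (n : Int) = (lsbBits n k).reverse := by
  rw [pyInt2bv, PySem.List.pyRange_neg_one, List.map_map]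
  have hn : (((n:Int) - 1) - (-1)).toNat = n := by omega
  rw [hn]
  apply List.ext_getElem
  · simp [length_lsbBits]
  · intro i h1 h2
    have hi : i < n := by simpa using h1
    simp only [List.getElem_map, List.getElem_range, Function.comp]
    rw [List.getElem_reverse, lsbBits_getElem n k _ (by simp [length_lsbBits]; omega)]
    have ht : (((n:Int) - 1) - (i:Int)).toNat = n - 1 - i := by omega
    rw [ht]
    have hs : ((k:Int) >>> (((n-1-i : Nat)):Int)) = ((k >>> (n-1-i) : Nat) : Int) := by simp
    rw [hs]
    have hm : PySem.Int.mod ((k >>> (n-1-i) : Nat) : Int) 2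
        = (((k >>> (n-1-i)) % 2 : Nat) : Int) := by
      exact_mod_cast PySem.Int.mod_natCast (k >>> (n-1-i)) 2
    rw [hm, Nat.shiftRight_eq_div_pow, length_lsbBits]
    simp
    norm_cast

theorem foldG (t : List Bool) (init : Int) :
    (List.range t.length).foldl
      (fun idx i => if t.getD i false then idx + (2:Int) ^ (t.length - 1 - i) else idx) init
    = init + (valM t : Int) := by
  induction t generalizing init with
  | nil => simp [valM, valL]
  | cons b u ih =>
      rw [List.length_cons, List.range_succ_eq_map, List.foldl_cons, List.foldl_map]
      have hfun : (fun (idx : Int) (i : Nat) =>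
            if (b :: u).getD i.succ false then idx + (2:Int) ^ (u.length + 1 - 1 - i.succ) else idx)
          = (fun (idx : Int) (i : Nat) =>
            if u.getD i false then idx + (2:Int) ^ (u.length - 1 - i) else idx) := by
        funext idx i
        have : u.length + 1 - 1 - i.succ = u.length - 1 - i := by omega
        rw [this, List.getD_cons_succ]
      rw [hfun, ih]
      have hstep : (if (b :: u).getD 0 false then init + (2:Int) ^ (u.length + 1 - 1 - 0) else init)
          = init + (b.toNat : Int) * 2 ^ u.length := by
        cases b <;> simp
      rw [hstep, valM_cons]
      push_cast
      ring

theorem pyBv2int_eq (bv : List Bool) : pyBv2int bv = (valM bv : Int) := by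
  rw [pyBv2int, PySem.List.pyRange_one]
  have hn : ((bv.length : Int) - 0).toNat = bv.length := by omega
  rw [hn, List.foldl_map]
  have hfun : (fun (index : Int) (k : Nat) =>
        if PySem.List.pyGetD bv ((0:Int) + (k:Int)) false then
          index + 2 ^ (((bv.length : Int)) - ((0:Int) + (k:Int)) - 1).toNat else index)
      = (fun (idx : Int) (i : Nat) =>
        if bv.getD i false then idx + (2:Int) ^ (bv.length - 1 - i) else idx) := by
    funext idx i
    have h1 : ((0:Int) + (i:Int)) = ((i:Nat) : Int) := by omega
    have h2 : (((bv.length : Int)) - (i:Int) - 1).toNat = bv.length - 1 - i := by omega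
    rw [h1, h2, PySem.List.pyGetD_natCast]
  rw [hfun, foldG]
  simp

-- gray-code lemmas
theorem sXor_eq (v : Nat) : sXor v = v ^^^ sXor (v / 2) := by
  by_cases h : v = 0
  · subst h; simp [sXor]
  · conv_lhs => rw [sXor, if_neg h]

theorem graytobinLoop_eq (mask x : Nat) : pyGraytobinLoop x mask = x ^^^ sXor mask := by
  induction mask using Nat.strong_induction_on generalizing x with
  | _ mask ih =>
    rw [pyGraytobinLoop, sXor]
    by_cases h : mask = 0
    · simp [h]
    · rw [if_neg h, if_neg h, ih (mask / 2) (Nat.div_lt_self (by omega) (by omega)), Nat.xor_assoc]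

theorem pyGraytobin_eq (x : Nat) : pyGraytobin x = sXor x := by
  rw [pyGraytobin, Nat.shiftRight_eq_div_pow, pow_one, graytobinLoop_eq]
  by_cases h : x = 0
  · subst h; simp [sXor]
  · conv_rhs => rw [sXor, if_neg h]

theorem sXor_lt (n x : Nat) (h : x < 2 ^ n) : sXor x < 2 ^ n := by
  induction x using Nat.strong_induction_on generalizing n with
  | _ x ih =>
    rw [sXor]
    by_cases hx : x = 0
    · simpa [hx] using Nat.pos_pow_of_pos n (by omega)
    · rw [if_neg hx]
      exact Nat.xor_lt_two_pow h (ih (x/2) (Nat.div_lt_self (by omega) (by omega)) n (by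
        calc x / 2 ≤ x := Nat.div_le_self x 2
        _ < 2 ^ n := h))

theorem xsplit (L v w : Nat) (b p : Bool) (hv : v < 2 ^ L) (hw : w < 2 ^ L) :
    (b.toNat * 2 ^ L + v) ^^^ (p.toNat * 2 ^ L + w) = (b.xor p).toNat * 2 ^ L + (v ^^^ w) := by
  have hx := Nat.xor_lt_two_pow hv hw
  apply Nat.eq_of_testBit_eq
  intro i
  rw [Nat.testBit_xor, mul_comm (b.toNat), mul_comm (p.toNat), mul_comm ((b.xor p).toNat),
    Nat.testBit_two_pow_mul_add _ hv, Nat.testBit_two_pow_mul_add _ hw,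
    Nat.testBit_two_pow_mul_add _ hx]
  by_cases h : i < L
  · simp [h, Nat.testBit_xor]
  · simp [h]
    cases b <;> cases p <;> cases i - L <;> simp [Nat.testBit]

theorem addsplit (L X : Nat) (b : Bool) (hX : X < 2 ^ L) :
    b.toNat * 2 ^ L + X = (b.toNat * 2 ^ L) ^^^ X := by
  have := xsplit L 0 X b false (by positivity) hX
  simpa using this.symm

theorem maskBool (a b : Bool) (m : Nat) :
    a.toNat * (2 ^ m - 1) ^^^ b.toNat * (2 ^ m - 1) = (a.xor b).toNat * (2 ^ m - 1) := by
  cases a <;> cases b <;> simp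

theorem sXor_split (m : Nat) (b : Bool) (v : Nat) (hv : v < 2 ^ m) :
    sXor (b.toNat * 2 ^ m + v) = b.toNat * 2 ^ m + (sXor v ^^^ b.toNat * (2 ^ m - 1)) := by
  induction m generalizing v with
  | zero =>
      interval_cases v
      cases b <;> simp [sXor]
  | succ m ih =>
      have hdiv : (b.toNat * 2 ^ (m+1) + v) / 2 = b.toNat * 2 ^ m + v / 2 := by
        cases b <;> simp [pow_succ] <;> omega
      have hv2 : v / 2 < 2 ^ m := by omega
      rw [sXor_eq, hdiv, ih _ hv2]
      have hSv2 : sXor (v/2) < 2 ^ m := sXor_lt m _ hv2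
      have hin : sXor (v/2) ^^^ b.toNat * (2^m - 1) < 2 ^ m :=
        Nat.xor_lt_two_pow hSv2 (by cases b <;> simp)
      rw [addsplit m _ b hin]
      rw [addsplit (m+1) v b hv]
      rw [sXor_eq v]
      have hmask : (b.toNat * (2^(m+1) - 1)) = (b.toNat * 2^m) ^^^ (b.toNat * (2^m - 1)) := by
        cases b
        · simp
        · have h1 : (2:Nat)^(m+1) - 1 = 2^m + (2^m - 1) := by rw [pow_succ]; omega
          have h2 := addsplit m (2^m - 1) true (by have := Nat.one_le_two_pow (n := m); omega)
          simp at h2 ⊢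
          rw [h1, h2]
      have hrhs_in : (v ^^^ sXor (v/2)) ^^^ b.toNat * (2^(m+1) - 1) < 2 ^ (m+1) := by
        apply Nat.xor_lt_two_pow (Nat.xor_lt_two_pow hv ?_) ?_
        · calc sXor (v/2) < 2^m := hSv2
            _ ≤ 2^(m+1) := by rw [pow_succ]; omega
        · cases b <;> simp
      rw [addsplit (m+1) _ b hrhs_in, hmask]
      ac_rfl

theorem mulXorPow (a b : Bool) (m : Nat) :
    (a.xor b).toNat * 2 ^ m = a.toNat * 2 ^ m ^^^ b.toNat * 2 ^ m := by
  cases a <;> cases b <;> simp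

theorem maskSplit (a : Bool) (m : Nat) :
    a.toNat * (2 ^ (m+1) - 1) = a.toNat * 2 ^ m ^^^ a.toNat * (2 ^ m - 1) := by
  cases a
  · simp
  · have h1 : (2:Nat)^(m+1) - 1 = 2^m + (2^m - 1) := by rw [pow_succ]; omega
    have h2 := addsplit m (2^m - 1) true (by have := Nat.one_le_two_pow (n := m); omega)
    simp at h2 ⊢
    rw [h1, h2]

theorem length_altGrayToBin (a : Bool) (bv : List Bool) : (altGrayToBin a bv).length = bv.length := by
  induction bv generalizing a with
  | nil => rfl
  | cons b t ih => simp [altGrayToBin, ih]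

theorem valM_altGrayToBin (bv : List Bool) (a : Bool) :
    valM (altGrayToBin a bv) = sXor (valM bv) ^^^ a.toNat * (2 ^ bv.length - 1) := by
  induction bv generalizing a with
  | nil => simp [altGrayToBin, valM, valL, sXor]
  | cons b t ih =>
      have hm := valM_lt t
      have hS := sXor_lt t.length _ hm
      have hmk : ∀ (c : Bool), c.toNat * (2 ^ t.length - 1) < 2 ^ t.length := by
        intro c; cases c <;> simp
      have hX : sXor (valM t) ^^^ ((a.xor b).toNat * (2 ^ t.length - 1)) < 2 ^ t.length :=
        Nat.xor_lt_two_pow hS (hmk _)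
      have hXb : sXor (valM t) ^^^ (b.toNat * (2 ^ t.length - 1)) < 2 ^ t.length :=
        Nat.xor_lt_two_pow hS (hmk _)
      show valM ((a.xor b) :: altGrayToBin (a.xor b) t) = _
      rw [valM_cons, length_altGrayToBin, ih, valM_cons, List.length_cons,
        sXor_split _ b _ hm, maskSplit a t.length,
        addsplit _ _ (a.xor b) hX, addsplit _ _ b hXb, mulXorPow a b, ← maskBool a b]
      ac_rfl

theorem length_altBinToGray (p : Bool) (t : List Bool) : (altBinToGray p t).length = t.length := by
  induction t generalizing p with
  | nil => rfl
  | cons b u ih => simp [altBinToGray, ih]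

theorem valM_altBinToGray_cons (u : List Bool) (b p : Bool) :
    valM (altBinToGray p (b :: u)) =
      valM (b :: u) ^^^ (p.toNat * 2 ^ u.length + valM (b :: u) / 2) := by
  induction u generalizing b p with
  | nil =>
      cases b <;> cases p <;> simp [altBinToGray, valM, valL]
  | cons c u' ih =>
      have hw : valM (c :: u') < 2 ^ (u'.length + 1) := by
        have := valM_lt (c :: u'); simpa using this
      have hw2 : valM (c :: u') / 2 < 2 ^ u'.length := by omega
      have hdiv : (b.toNat * 2 ^ (u'.length + 1) + valM (c :: u')) / 2
          = b.toNat * 2 ^ u'.length + valM (c :: u') / 2 := by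
        cases b <;> simp [pow_succ] <;> omega
      have hin : b.toNat * 2 ^ u'.length + valM (c :: u') / 2 < 2 ^ (u'.length + 1) := by
        cases b <;> simp [pow_succ] at * <;> omega
      show valM ((b.xor p) :: altBinToGray b (c :: u')) = _
      rw [valM_cons, length_altBinToGray, ih c b, valM_cons (b := b)]
      simp only [List.length_cons]
      rw [hdiv, addsplit _ _ (b.xor p) (Nat.xor_lt_two_pow hw hin),
        addsplit _ _ b hw,
        addsplit (u'.length + 1) _ p hin,
        addsplit u'.length _ b hw2, mulXorPow b p]
      ac_rfl

theorem valM_altBinToGray (t : List Bool) :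
    valM (altBinToGray false t) = pyBintogray (valM t) := by
  cases t with
  | nil => simp [altBinToGray, valM, valL, pyBintogray]
  | cons b u =>
      rw [valM_altBinToGray_cons, pyBintogray, Nat.shiftRight_eq_div_pow, pow_one]
      simp

-- ripple lemmas
theorem valM_replicate_true (n : Nat) : valM (List.replicate n true) = 2 ^ n - 1 := by
  induction n with
  | zero => rfl
  | succ n ih =>
      have h := Nat.one_le_two_pow (n := n)
      simp [List.replicate_succ, valM_cons, ih, pow_succ]; omega

theorem valM_replicate_false (n : Nat) : valM (List.replicate n false) = 0 := by
  induction n with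
  | zero => rfl
  | succ n ih => simp [List.replicate_succ, valM_cons, ih]

theorem eq_replicate_true_of_valM (bv : List Bool) (h : valM bv = 2 ^ bv.length - 1) :
    bv = List.replicate bv.length true := by
  induction bv with
  | nil => rfl
  | cons b t ih =>
      have hm := valM_lt t
      have hp := Nat.one_le_two_pow (n := t.length)
      rw [valM_cons, List.length_cons, pow_succ] at h
      cases b with
      | false => simp at h; omega
      | true =>
          simp at h
          rw [List.length_cons, List.replicate_succ]
          exact congrArg (List.cons true) (ih (by omega))

theorem eq_replicate_false_of_valM (bv : List Bool) (h : valM bv = 0) :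
    bv = List.replicate bv.length false := by
  induction bv with
  | nil => rfl
  | cons b t ih =>
      have hp := Nat.one_le_two_pow (n := t.length)
      rw [valM_cons] at h
      cases b with
      | true => simp at h
      | false =>
          simp at h
          rw [List.length_cons, List.replicate_succ]
          exact congrArg (List.cons false) (ih (by omega))

theorem altRipple_cons (flip b : Bool) (t t' : List Bool) (c : Bool)
    (h : altRipple flip t = (t', c)) :
    altRipple flip (b :: t) =
      if c then (if b = flip then ((!flip) :: t', true) else (flip :: t', false))
      else (b :: t', false) := by
  rw [altRipple, h]
  cases c <;> rfl

theorem ripple_length (flip : Bool) (bv : List Bool) :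
    (altRipple flip bv).1.length = bv.length := by
  induction bv with
  | nil => rfl
  | cons b t ih =>
      rcases h : altRipple flip t with ⟨t', c⟩
      rw [h] at ih; simp at ih
      rw [altRipple_cons flip b t t' c h]
      cases c <;> by_cases hb : b = flip <;> simp [hb, ih]

theorem ripple_replicate (flip : Bool) (n : Nat) :
    altRipple flip (List.replicate n flip) = (List.replicate n (!flip), true) := by
  induction n with
  | zero => rfl
  | succ n ih =>
      rw [List.replicate_succ, altRipple_cons flip flip _ _ _ ih]
      simp [List.replicate_succ]

theorem ripple_carry_iff (flip : Bool) (bv : List Bool) :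
    (altRipple flip bv).2 = true ↔ bv = List.replicate bv.length flip := by
  induction bv with
  | nil => simp [altRipple]
  | cons b t ih =>
      rcases h : altRipple flip t with ⟨t', c⟩
      rw [h] at ih; simp at ih
      rw [List.length_cons, List.replicate_succ,
        altRipple_cons flip b t t' c h]
      cases c with
      | true =>
          simp at ih
          by_cases hb : b = flip <;> simp [hb, ← ih]
      | false =>
          simp at ih
          simp [ih]

theorem ripple_succ (bv : List Bool) (h : bv ≠ List.replicate bv.length true) :
    (altRipple true bv).2 = false ∧ valM (altRipple true bv).1 = valM bv + 1 := by
  induction bv with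
  | nil => exact absurd rfl h
  | cons b t ih =>
      rcases hr : altRipple true t with ⟨t', c⟩
      cases c with
      | true =>
          have ht : t = List.replicate t.length true := by
            have := (ripple_carry_iff true t).1; rw [hr] at this; exact this rfl
          have hb : b = false := by
            cases b
            · rfl
            · exact absurd (by rw [List.length_cons, List.replicate_succ, ← ht]) h
          subst hb
          have ht' : t' = List.replicate t.length false := by
            have h2 := ripple_replicate true t.length
            rw [← ht, hr] at h2
            simpa using congrArg Prod.fst h2
          have hlen : t'.length = t.length := by rw [ht']; simp
          rw [altRipple_cons true false t t' true hr]
          simp only [if_true, Bool.false_eq_true, if_false, reduceIte]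
          refine ⟨by trivial, ?_⟩
          rw [valM_cons, valM_cons, hlen, ht', valM_replicate_false]
          conv_rhs => rw [ht, valM_replicate_true]
          have := Nat.one_le_two_pow (n := t.length)
          simp; omega
      | false =>
          have ht : t ≠ List.replicate t.length true := by
            intro hc
            have := (ripple_carry_iff true t).2 hc
            rw [hr] at this; simp at this
          obtain ⟨-, hv⟩ := ih ht
          rw [hr] at hv; simp at hv
          have hlen : t'.length = t.length := by
            have h2 := ripple_length true t
            rw [hr] at h2; simpa using h2
          rw [altRipple_cons true b t t' false hr]
          simp only [Bool.false_eq_true, if_false]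
          refine ⟨by trivial, ?_⟩
          rw [valM_cons, valM_cons, hlen, hv]
          omega

theorem ripple_pred (bv : List Bool) (h : bv ≠ List.replicate bv.length false) :
    (altRipple false bv).2 = false ∧ valM (altRipple false bv).1 + 1 = valM bv := by
  induction bv with
  | nil => exact absurd rfl h
  | cons b t ih =>
      rcases hr : altRipple false t with ⟨t', c⟩
      cases c with
      | true =>
          have ht : t = List.replicate t.length false := by
            have := (ripple_carry_iff false t).1; rw [hr] at this; exact this rfl
          have hb : b = true := by
            cases b
            · exact absurd (by rw [List.length_cons, List.replicate_succ, ← ht]) h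
            · rfl
          subst hb
          have ht' : t' = List.replicate t.length true := by
            have h2 := ripple_replicate false t.length
            rw [← ht, hr] at h2
            simpa using congrArg Prod.fst h2
          have hlen : t'.length = t.length := by rw [ht']; simp
          rw [altRipple_cons false true t t' true hr]
          simp only [Bool.true_eq_false, if_false, if_true, reduceIte]
          refine ⟨by trivial, ?_⟩
          rw [valM_cons, valM_cons, hlen, ht', valM_replicate_true]
          conv_rhs => rw [ht, valM_replicate_false]
          have := Nat.one_le_two_pow (n := t.length)
          simp; omega
      | false =>
          have ht : t ≠ List.replicate t.length false := by
            intro hc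
            have := (ripple_carry_iff false t).2 hc
            rw [hr] at this; simp at this
          obtain ⟨-, hv⟩ := ih ht
          rw [hr] at hv; simp at hv
          have hlen : t'.length = t.length := by
            have h2 := ripple_length false t
            rw [hr] at h2; simpa using h2
          rw [altRipple_cons false b t t' false hr]
          simp only [Bool.false_eq_true, if_false]
          refine ⟨by trivial, ?_⟩
          rw [valM_cons, valM_cons, hlen]
          omega

theorem ripple_mod_succ (l : List Bool) :
    valM (altRipple true l).1 = (valM l + 1) % 2 ^ l.length := by
  by_cases h : l = List.replicate l.length true
  · conv_lhs => rw [h, ripple_replicate]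
    rw [h, valM_replicate_true]
    conv_rhs => rw [h]
    simp [valM_replicate_false, valM_replicate_true]
    have := Nat.one_le_two_pow (n := l.length)
    rw [Nat.sub_add_cancel this, Nat.mod_self]
  · obtain ⟨-, hv⟩ := ripple_succ l h
    rw [hv]
    have hlt : valM l < 2 ^ l.length := valM_lt l
    have hne : valM l ≠ 2 ^ l.length - 1 := fun hc => h (eq_replicate_true_of_valM l hc)
    rw [Nat.mod_eq_of_lt (by omega)]

theorem ripple_mod_pred (l : List Bool) :
    valM (altRipple false l).1 = (valM l + (2 ^ l.length - 1)) % 2 ^ l.length := by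
  have hpos := Nat.one_le_two_pow (n := l.length)
  by_cases h : l = List.replicate l.length false
  · conv_lhs => rw [h, ripple_replicate]
    rw [h, valM_replicate_false]
    simp only [List.length_replicate, Nat.zero_add, Bool.not_false, valM_replicate_true]
    rw [Nat.mod_eq_of_lt (by omega)]
  · obtain ⟨-, hv⟩ := ripple_pred l h
    have hlt : valM l < 2 ^ l.length := valM_lt l
    have heq : valM l + (2 ^ l.length - 1) = (valM l - 1) + 2 ^ l.length := by omega
    rw [heq, Nat.add_mod_right, Nat.mod_eq_of_lt (by omega)]
    omega

theorem beq_one_one : ((1:Int) == 1) = true := by decide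
theorem beq_neg_one_one : ((-1:Int) == 1) = false := by decide

-- B-side branch characterizations (definitional)
theorem alt_nongray_eq (bv : List Bool) (inc : Int) (s : Bool) (h : inc = 1 ∨ inc = -1) :
    increment_bv_alt bv inc false s =
      (if (altRipple (inc == 1) bv).2 then (if s then bv else [])
       else (altRipple (inc == 1) bv).1) := by
  unfold increment_bv_alt
  rw [if_pos h]
  rfl

theorem alt_gray_eq (bv : List Bool) (inc : Int) (s : Bool) (h : inc = 1 ∨ inc = -1) :
    increment_bv_alt bv inc true s =
      altBinToGray false (altRipple (inc == 1) (altGrayToBin false bv)).1 := by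
  unfold increment_bv_alt
  rw [if_pos h]
  rfl

-- the A-side gray index, as a Nat
theorem gray_index_succ (V n : Nat) :
    (PySem.Int.mod ((V : Int) + 1) (2 ^ n)).toNat = (V + 1) % 2 ^ n := by
  have hp : (0:Int) < 2 ^ n := by positivity
  rw [PySem.Int.mod_eq_emod_of_pos hp]
  have h1 : ((V : Int) + 1) = ((V + 1 : Nat) : Int) := by push_cast; ring
  have h2 : ((2:Int) ^ n) = ((2 ^ n : Nat) : Int) := by push_cast; ring
  rw [h1, h2]
  norm_cast

theorem gray_index_pred (V n : Nat) :
    (PySem.Int.mod ((V : Int) + -1) (2 ^ n)).toNat = (V + (2 ^ n - 1)) % 2 ^ n := by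
  have hp : (0:Int) < 2 ^ n := by positivity
  have hone := Nat.one_le_two_pow (n := n)
  rw [PySem.Int.mod_eq_emod_of_pos hp]
  have h2 : ((2:Int) ^ n) = ((2 ^ n : Nat) : Int) := by push_cast; ring
  have h1 : ((V : Int) + -1) = ((V + (2 ^ n - 1) : Nat) : Int) - ((2 ^ n : Nat) : Int) := by
    push_cast [hone]; ring
  rw [h1, h2, Int.sub_emod_right]
  norm_cast

-- ===== VERDICT (by name: the statement is the Claim_ definition above) =====
theorem increment_bv_spec : Claim_equal_increment_bv := by
  intro bv inc g s _ hpre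
  obtain ⟨hinc, hover⟩ := hpre
  unfold Spec_increment_bv
  cases g with
  | true =>
      rw [alt_gray_eq bv inc s hinc]
      unfold increment_bv
      rw [if_pos hinc]
      simp only [eq_self_iff_true, if_true]
      rw [pyBv2int_eq]
      simp only [Int.toNat_natCast, pyGraytobin_eq]
      set n := bv.length with hn
      set V := sXor (valM bv) with hV
      set gl := altGrayToBin false bv with hgl
      have hg'len : gl.length = n := length_altGrayToBin false bv
      have hg'v : valM gl = V := by rw [hgl, valM_altGrayToBin]; simp; rw [hV]
      rcases hinc with h1 | h1 <;> subst h1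
      · rw [beq_one_one]
        set r := (altRipple true gl).1 with hr
        have hrv : valM r = (V + 1) % 2 ^ n := by
          rw [hr, ripple_mod_succ, hg'v, hg'len]
        have hrlen : r.length = n := by rw [hr, ripple_length, hg'len]
        have hout : valM (altBinToGray false r) = pyBintogray ((V + 1) % 2 ^ n) := by
          rw [valM_altBinToGray, hrv]
        have houtlen : (altBinToGray false r).length = n := by
          rw [length_altBinToGray, hrlen]
        rw [gray_index_succ V n, pyInt2bv_eq]
        conv_rhs => rw [← rev_lsbBits_valM (altBinToGray false r)]
        rw [hout, houtlen]
      · rw [beq_neg_one_one]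
        set r := (altRipple false gl).1 with hr
        have hrv : valM r = (V + (2 ^ n - 1)) % 2 ^ n := by
          rw [hr, ripple_mod_pred, hg'v, hg'len]
        have hrlen : r.length = n := by rw [hr, ripple_length, hg'len]
        have hout : valM (altBinToGray false r) = pyBintogray ((V + (2 ^ n - 1)) % 2 ^ n) := by
          rw [valM_altBinToGray, hrv]
        have houtlen : (altBinToGray false r).length = n := by
          rw [length_altBinToGray, hrlen]
        rw [gray_index_pred V n, pyInt2bv_eq]
        conv_rhs => rw [← rev_lsbBits_valM (altBinToGray false r)]
        rw [hout, houtlen]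
  | false =>
      rw [alt_nongray_eq bv inc s hinc]
      unfold increment_bv
      rw [if_pos hinc]
      simp only [Bool.false_eq_true, if_false]
      rcases hinc with h1 | h1 <;> subst h1
      · by_cases hrep : bv = List.replicate bv.length true
        · have hc : (altRipple ((1:Int) == 1) bv).2 = true := by
            rw [beq_one_one]
            exact (ripple_carry_iff true bv).2 hrep
          rw [if_pos ⟨hrep, by norm_num⟩, hc, if_pos rfl]
        · have hguard1 : ¬ (bv = List.replicate bv.length true ∧ (1:Int) > 0) := by
            intro hcl; exact hrep hcl.1
          have hguard2 : ¬ (bv = List.replicate bv.length false ∧ (1:Int) < 0) := by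
            intro hcl; norm_num at hcl
          rw [if_neg hguard1, if_neg hguard2, beq_one_one]
          obtain ⟨hc, hv⟩ := ripple_succ bv hrep
          rw [hc]
          simp only [Bool.false_eq_true, if_false]
          rw [pyBv2int_eq]
          have h1 : ((valM bv : Int) + 1) = ((valM bv + 1 : Nat) : Int) := by push_cast; ring
          rw [h1, pyInt2bv_eq]
          conv_rhs => rw [← rev_lsbBits_valM (altRipple true bv).1]
          rw [hv, ripple_length]
      · by_cases hrep : bv = List.replicate bv.length false
        · have hc : (altRipple ((-1:Int) == 1) bv).2 = true := by
            rw [beq_neg_one_one]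
            exact (ripple_carry_iff false bv).2 hrep
          have hguard1 : ¬ (bv = List.replicate bv.length true ∧ (-1:Int) > 0) := by
            intro hcl; norm_num at hcl
          rw [if_neg hguard1, if_pos ⟨hrep, by norm_num⟩, hc, if_pos rfl]
        · have hguard1 : ¬ (bv = List.replicate bv.length true ∧ (-1:Int) > 0) := by
            intro hcl; norm_num at hcl
          have hguard2 : ¬ (bv = List.replicate bv.length false ∧ (-1:Int) < 0) := by
            intro hcl; exact hrep hcl.1
          rw [if_neg hguard1, if_neg hguard2, beq_neg_one_one]
          obtain ⟨hc, hv⟩ := ripple_pred bv hrep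
          rw [hc]
          simp only [Bool.false_eq_true, if_false]
          rw [pyBv2int_eq]
          have hpos : valM bv ≠ 0 := fun h0 => hrep (eq_replicate_false_of_valM bv h0)
          have h1 : ((valM bv : Int) + -1) = ((valM bv - 1 : Nat) : Int) := by
            push_cast [Nat.one_le_iff_ne_zero.mpr hpos]; ring
          rw [h1, pyInt2bv_eq]
          conv_rhs => rw [← rev_lsbBits_valM (altRipple false bv).1]
          rw [ripple_length]
          have hv' : valM (altRipple false bv).1 = valM bv - 1 := by omega
          rw [hv']
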